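-- pv_equiv track=rewrite | github.com/m6r-ai/humbug | src/aifpl/aifpl_tokenizer.py | _find_complex_separator
-- ===== SOURCE A (Python) =====
-- def _find_complex_separator(token: str) -> int:
--     """
--     Find the position of + or - that separates real and imaginary parts.
--
--     Must handle scientific notation correctly (e.g., "1e-10+2" should find the +, not the -)
--
--     Examples:
--     - "3+4" → 1 (position of +)
--     - "3-4" → 1 (position of -)
--     - "1e-10+2" → 5 (position of +, not the - in e-10)
--     - "1.5e2+3.7e-1" → 5 (position of +)
--     - "4" → -1 (no separator, pure imaginary)
--     - "-5" → -1 (leading -, not separator)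
--
--     Args:
--         token: Token without the trailing 'j'
--
--     Returns:
--         Position of separator, or -1 if not found (pure imaginary)
--     """
--     # Scan from left to right, skip over scientific notation
--     i = 0
--     if token and token[0] in '+-':
--         i = 1  # Skip leading sign
--
--     while i < len(token):
--         char = token[i]
--
--         # Check if this is a separator (not part of scientific notation)
--         if char in '+-':
--             # It's a separator if it's not immediately after 'e' or 'E'
--             if i > 0 and token[i-1].lower() != 'e':
--                 return i
--
--         i += 1
--
--     return -1  # No separator found
-- ===== SOURCE B (Python) =====
-- def _find_complex_separator(token: str) -> int:
--     """Find the position of + or - separating real and imaginary parts, or -1.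
--
--     Two staged passes instead of an index scan: first neutralize every sign
--     that belongs to scientific notation (replace 'e+'/'e-'/'E+'/'E-' by
--     'e#'/'E#', which keeps all positions aligned), then the separator is
--     simply the leftmost '+' or '-' at position >= 1 of the masked string.
--     """
--     masked = (token.replace('e+', 'e#').replace('e-', 'e#')
--                    .replace('E+', 'E#').replace('E-', 'E#'))
--     p = masked.find('+', 1)
--     m = masked.find('-', 1)
--     if p < 0:
--         return m
--     if m < 0:
--         return p
--     return min(p, m)
-- ===== Notes on version B (the rewrite author's own statement) =====
-- stated objective: alternative
-- what changed: Replaces A's index-based while loop with its leading-sign skip and i-1 lookback by two staged string passes: first mask every exponent sign via str.replace of 'e+'/'e-'/'E+'/'E-' (position-preserving), then take the leftmost '+' or '-' found from position 1 with plain str.find and min.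
import Mathlib
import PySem

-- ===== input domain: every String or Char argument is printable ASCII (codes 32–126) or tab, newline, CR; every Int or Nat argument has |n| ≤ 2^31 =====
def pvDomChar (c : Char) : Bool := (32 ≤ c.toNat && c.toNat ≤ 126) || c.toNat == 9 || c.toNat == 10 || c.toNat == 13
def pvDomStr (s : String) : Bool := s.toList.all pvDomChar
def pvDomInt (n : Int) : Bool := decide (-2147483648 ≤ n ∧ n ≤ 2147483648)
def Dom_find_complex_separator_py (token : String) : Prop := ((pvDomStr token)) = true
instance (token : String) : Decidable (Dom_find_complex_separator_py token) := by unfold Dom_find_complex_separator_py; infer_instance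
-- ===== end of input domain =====

-- B replaces A's index-based while loop (leading-sign skip, i-1 lookback) by two staged
-- string passes: mask the exponent signs with str.replace, then a plain find/min of the
-- leftmost sign from position 1 (alternative decomposition; same O(n) cost).

-- ===== PORT A =====
-- A's while loop: from index i, return the first separator position, else -1
def pvLoopA (cs : List Char) (i : Nat) : Int :=
  if h : i < cs.length then
    if cs[i] == '+' || cs[i] == '-' then
      if hp : 0 < i then
        if ¬ (PySem.Chars.lowerChar (cs[i-1]'(by omega)) == 'e') then (i : Int)
        else pvLoopA cs (i+1)
      else pvLoopA cs (i+1)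
    else pvLoopA cs (i+1)
  else -1
termination_by cs.length - i

def find_complex_separator_py (token : String) : Int :=
  -- i = 1 if token and token[0] in '+-' else 0; then the while loop
  pvLoopA token.toList
    (if (match token.toList with | c :: _ => c == '+' || c == '-' | [] => false) then 1 else 0)

-- ===== PORT B =====
def find_complex_separator_py_alt (token : String) : Int :=
  -- masked = token.replace('e+','e#').replace('e-','e#').replace('E+','E#').replace('E-','E#')
  let masked := PySem.Str.replace (PySem.Str.replace (PySem.Str.replace
      (PySem.Str.replace token "e+" "e#") "e-" "e#") "E+" "E#") "E-" "E#"
  -- p = masked.find('+', 1); m = masked.find('-', 1)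
  let p := PySem.Str.findFrom masked "+" 1
  let m := PySem.Str.findFrom masked "-" 1
  if p < 0 then m else if m < 0 then p else min p m

-- ===== PRECONDITION & SPEC =====
def Spec_find_complex_separator_py (token : String) (out : Int) : Prop := out = find_complex_separator_py_alt token
instance (token : String) (out : Int) : Decidable (Spec_find_complex_separator_py token out) := by unfold Spec_find_complex_separator_py; infer_instance

-- ===== CLAIM (what is proved, stated in full; the proofs are below) =====
def Claim_equal_find_complex_separator_py : Prop := ∀ (token : String), Dom_find_complex_separator_py token → Spec_find_complex_separator_py token (find_complex_separator_py token)

-- ===== LEMMAS AND PROOFS =====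

-- the "is a separator" test on a (prev, cur) pair
def pvSep (pc : Char × Char) : Bool :=
  (pc.2 == '+' || pc.2 == '-') && !(pc.1 == 'e' || pc.1 == 'E')

-- one replace pass 'm g -> m #', phrased with a carried previous ORIGINAL character
def pvMask2 (m g p : Char) : List Char → List Char
  | [] => []
  | a :: t => (if a = g ∧ p = m then '#' else a) :: pvMask2 m g a t

-- the composite of the four passes: mask a sign whose predecessor is an exponent marker
def pvMaskAll (p : Char) : List Char → List Char
  | [] => []
  | a :: t => (if (a = '+' ∨ a = '-') ∧ (p = 'e' ∨ p = 'E') then '#' else a) :: pvMaskAll a t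

theorem pv_ofNat_toNat (n : Nat) (h : n < 55296) : (Char.ofNat n).toNat = n := by
  simp [Char.ofNat, Nat.isValidChar, h, Char.ofNatAux, Char.toNat]

theorem pv_char_eq_iff (c d : Char) : c = d ↔ c.toNat = d.toNat := by
  constructor
  · intro h; rw [h]
  · intro h; exact Char.ext (by exact UInt32.toNat_inj.mp h)

-- lowering a character yields 'e' exactly for 'e' and 'E'
theorem pv_lowerChar_eq_e (c : Char) : (PySem.Chars.lowerChar c == 'e') = (c == 'e' || c == 'E') := by
  unfold PySem.Chars.lowerChar PySem.Chars.isupper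
  by_cases h : ('A' ≤ c && c ≤ 'Z') = true
  · rw [if_pos h]
    simp only [Bool.and_eq_true, decide_eq_true_eq] at h
    obtain ⟨h1, h2⟩ := h
    have hb : 65 ≤ c.toNat ∧ c.toNat ≤ 90 := by
      simp [Char.le_def, UInt32.le_iff_toNat_le] at h1 h2
      exact ⟨h1, h2⟩
    have hofn : (Char.ofNat (c.toNat + 32)).toNat = c.toNat + 32 := pv_ofNat_toNat _ (by omega)
    rw [Bool.eq_iff_iff]
    simp only [beq_iff_eq, Bool.or_eq_true]
    rw [pv_char_eq_iff (Char.ofNat (c.toNat + 32)) 'e', pv_char_eq_iff c 'e', pv_char_eq_iff c 'E', hofn]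
    have he : ('e').toNat = 101 := rfl
    have hE : ('E').toNat = 69 := rfl
    rw [he, hE]
    omega
  · rw [if_neg h]
    have hcE : c ≠ 'E' := by rintro rfl; exact h (by decide)
    simp [hcE]

-- A's loop from i+1 is the pairwise first-match search over the pairs from offset i
theorem pvLoopA_eq_findIdx (cs : List Char) (i : Nat) :
    pvLoopA cs (i + 1) =
      (match List.findIdx? pvSep ((cs.drop i).zip (cs.drop (i+1))) with
       | some k => ((i + 1 + k : Nat) : Int)
       | none => -1) := by
  suffices H : ∀ n i, cs.length - i ≤ n → pvLoopA cs (i + 1) =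
      (match List.findIdx? pvSep ((cs.drop i).zip (cs.drop (i+1))) with
       | some k => ((i + 1 + k : Nat) : Int)
       | none => -1) from H _ i le_rfl
  intro n
  induction n with
  | zero =>
    intro i hle
    have hlen : cs.length ≤ i := by omega
    rw [List.drop_eq_nil_of_le hlen]
    rw [pvLoopA.eq_def, dif_neg (by omega)]
    simp
  | succ n ih =>
    intro i hle
    by_cases hlen : cs.length ≤ i
    · rw [List.drop_eq_nil_of_le hlen]
      rw [pvLoopA.eq_def, dif_neg (by omega)]
      simp
    · have hi : i < cs.length := by omega
      by_cases h2 : i + 1 < cs.length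
      · rw [List.drop_eq_getElem_cons hi, List.drop_eq_getElem_cons h2, List.zip_cons_cons,
          List.findIdx?_cons]
        rw [← List.drop_eq_getElem_cons h2]
        rw [pvLoopA.eq_def, dif_pos h2, dif_pos (by omega : 0 < i + 1)]
        simp only [Nat.add_sub_cancel]
        by_cases hsign : (cs[i+1] == '+' || cs[i+1] == '-') = true
        · by_cases hprev : (PySem.Chars.lowerChar cs[i] == 'e') = true
          · -- sign right after an exponent marker: both continue
            have hor : (cs[i] == 'e' || cs[i] == 'E') = true := by
              rw [← pv_lowerChar_eq_e]; exact hprev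
            have hps : pvSep (cs[i], cs[i+1]) = false := by simp [pvSep, hsign, hor]
            rw [if_pos hsign, if_neg (by simp [hprev]), if_neg (by simp [hps])]
            rw [ih (i+1) (by omega)]
            cases hf : List.findIdx? pvSep ((cs.drop (i+1)).zip (cs.drop (i+1+1))) with
            | none => rfl
            | some k => simp only [Option.map_some]; push_cast; ring
          · -- genuine separator: both return i+1
            have hor : (cs[i] == 'e' || cs[i] == 'E') = false := by
              rw [← pv_lowerChar_eq_e]; simpa using hprev
            have hps : pvSep (cs[i], cs[i+1]) = true := by simp [pvSep, hsign, hor]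
            rw [if_pos hsign, if_pos (by simp [hprev]), if_pos (by simp [hps])]
        · -- not a sign: both continue
          have hps : pvSep (cs[i], cs[i+1]) = false := by simp [pvSep, hsign]
          rw [if_neg hsign, if_neg (by simp [hps])]
          rw [ih (i+1) (by omega)]
          cases hf : List.findIdx? pvSep ((cs.drop (i+1)).zip (cs.drop (i+1+1))) with
          | none => rfl
          | some k => simp only [Option.map_some]; push_cast; ring
      · -- i is the last index: the pair list is empty and the loop past i returns -1
        have hnil : cs.drop (i+1) = [] := List.drop_eq_nil_of_le (by omega)
        rw [hnil, List.zip_nil_right]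
        rw [pvLoopA.eq_def, dif_neg (by omega)]
        simp

-- the loop from 0 equals the loop from 1 (a sign at position 0 is never a separator)
theorem pvLoopA_zero_eq_one (cs : List Char) : pvLoopA cs 0 = pvLoopA cs 1 := by
  by_cases h : 0 < cs.length
  · conv_lhs => rw [pvLoopA.eq_def]
    rw [dif_pos h]
    split_ifs with h1 h2 h3
    · exact absurd h2 (by omega)
    · exact absurd h2 (by omega)
    · rfl
    · rfl
  · rw [pvLoopA.eq_def, dif_neg (by omega), pvLoopA.eq_def, dif_neg (by omega)]

-- replace.go for the pattern [m, g] -> [m, '#'] is the carried-prev pass pvMask2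
theorem pv_replace_go_eq_mask2 (m g : Char) (hmg : m ≠ g) :
    ∀ (fuel : Nat) (l acc : List Char) (p : Char),
      l.length ≤ fuel → ¬(p = m ∧ l.head? = some g) →
      PySem.Chars.replace.go [m, g] [m, '#'] fuel l acc = acc.reverse ++ pvMask2 m g p l := by
  intro fuel
  induction fuel with
  | zero =>
    intro l acc p hle _
    have : l = [] := List.eq_nil_of_length_eq_zero (by omega)
    subst this
    simp [PySem.Chars.replace.go, pvMask2]
  | succ fuel ih =>
    intro l acc p hle hp
    match l with
    | [] => simp [PySem.Chars.replace.go, pvMask2]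
    | c :: t =>
      rw [PySem.Chars.replace.go]
      by_cases hpre : List.isPrefixOf [m, g] (c :: t) = true
      · rw [if_pos hpre]
        match t, hpre with
        | g' :: t', hpre =>
          have hcm : m = c ∧ g = g' := by
            simpa [List.isPrefixOf] using hpre
          obtain ⟨rfl, rfl⟩ := hcm
          simp only [List.length_cons, List.length_nil, List.drop_succ_cons, List.drop_zero]
          rw [ih t' ([m, '#'].reverse ++ acc) g (by simp at hle ⊢; omega)
              (by simp; intro h; exact absurd h.symm hmg)]
          simp [pvMask2, hmg]
        | [], hpre => simp [List.isPrefixOf] at hpre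
      · rw [if_neg hpre]
        have hnot : ¬(c = m ∧ t.head? = some g) := by
          intro ⟨rfl, hh⟩
          match t, hh with
          | g' :: t', hh =>
            simp at hh
            subst hh
            simp [List.isPrefixOf] at hpre
        rw [ih t (c :: acc) c (by simp at hle ⊢; omega) hnot]
        have hmask : (if c = g ∧ p = m then '#' else c) = c := by
          split_ifs with hc
          · exact absurd ⟨hc.2, by simp [hc.1]⟩ hp
          · rfl
        simp [pvMask2, hmask]

theorem pv_replace_eq_mask2 (m g : Char) (hmg : m ≠ g) (hm : m ≠ '#') (l : List Char) :
    PySem.Chars.replace l [m, g] [m, '#'] = pvMask2 m g '#' l := by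
  rw [PySem.Chars.replace]
  rw [if_neg (by simp [List.isEmpty])]
  rw [pv_replace_go_eq_mask2 m g hmg l.length l [] '#' le_rfl
      (by intro h; exact hm h.1.symm)]
  simp

-- the four replace passes compose to pvMaskAll
theorem pv_mask_comp : ∀ (t : List Char) (p p1 p2 p3 p4 : Char),
    (p1 = 'e' ↔ p = 'e') → (p2 = 'e' ↔ p = 'e') → (p3 = 'E' ↔ p = 'E') → (p4 = 'E' ↔ p = 'E') →
    pvMask2 'E' '-' p4 (pvMask2 'E' '+' p3 (pvMask2 'e' '-' p2 (pvMask2 'e' '+' p1 t)))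
      = pvMaskAll p t := by
  intro t
  induction t with
  | nil => intro _ _ _ _ _ _ _ _ _; simp [pvMask2, pvMaskAll]
  | cons a t ih =>
    intro p p1 p2 p3 p4 h1 h2 h3 h4
    by_cases hap : a = '+'
    · subst hap
      by_cases he1 : p1 = 'e'
      · have hpe : p = 'e' := h1.mp he1
        subst hpe
        simp only [pvMask2, pvMaskAll]
        simp [he1, ih '+' '+' '#' '#' '#' (by simp) (by simp) (by simp) (by simp)]
      · have hpe : p ≠ 'e' := fun h => he1 (h1.mpr h)
        by_cases he3 : p3 = 'E'
        · have hpE : p = 'E' := h3.mp he3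
          subst hpE
          simp only [pvMask2, pvMaskAll]
          simp [he1, he3, ih '+' '+' '+' '+' '#' (by simp) (by simp) (by simp) (by simp)]
        · have hpE : p ≠ 'E' := fun h => he3 (h3.mpr h)
          simp only [pvMask2, pvMaskAll]
          simp [he1, he3, hpe, hpE,
            ih '+' '+' '+' '+' '+' (by simp) (by simp) (by simp) (by simp)]
    · by_cases ham : a = '-'
      · subst ham
        by_cases he2 : p2 = 'e'
        · have hpe : p = 'e' := h2.mp he2
          subst hpe
          simp only [pvMask2, pvMaskAll]
          simp [he2, ih '-' '-' '-' '#' '#' (by simp) (by simp) (by simp) (by simp)]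
        · have hpe : p ≠ 'e' := fun h => he2 (h2.mpr h)
          by_cases he4 : p4 = 'E'
          · have hpE : p = 'E' := h4.mp he4
            subst hpE
            simp only [pvMask2, pvMaskAll]
            simp [he2, he4, ih '-' '-' '-' '-' '-' (by simp) (by simp) (by simp) (by simp)]
          · have hpE : p ≠ 'E' := fun h => he4 (h4.mpr h)
            simp only [pvMask2, pvMaskAll]
            simp [he2, he4, hpe, hpE,
              ih '-' '-' '-' '-' '-' (by simp) (by simp) (by simp) (by simp)]
      · simp only [pvMask2, pvMaskAll]
        simp [hap, ham, ih a a a a a (by simp) (by simp) (by simp) (by simp)]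

-- the leftmost sign in the masked tail is the leftmost genuine separator pair
theorem pv_findIdx_maskAll : ∀ (t : List Char) (p : Char),
    List.findIdx? (fun x => x == '+' || x == '-') (pvMaskAll p t)
      = List.findIdx? pvSep ((p :: t).zip t) := by
  intro t
  induction t with
  | nil => intro p; simp [pvMaskAll]
  | cons a t ih =>
    intro p
    simp only [pvMaskAll, List.zip_cons_cons, List.findIdx?_cons]
    have hhead : ((if (a = '+' ∨ a = '-') ∧ (p = 'e' ∨ p = 'E') then '#' else a) == '+'
        || (if (a = '+' ∨ a = '-') ∧ (p = 'e' ∨ p = 'E') then '#' else a) == '-')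
        = pvSep (p, a) := by
      unfold pvSep
      split_ifs with hc
      · have : (p == 'e' || p == 'E') = true := by
          rcases hc.2 with h | h <;> simp [h]
        simp [this]
      · rw [Bool.eq_iff_iff]
        simp only [Bool.or_eq_true, Bool.and_eq_true, Bool.not_eq_eq_eq_not, Bool.not_true,
          beq_iff_eq, Bool.or_eq_false_iff, beq_eq_false_iff_ne]
        constructor
        · intro h
          refine ⟨h, ?_, ?_⟩ <;> (intro hp; exact hc ⟨h, by simp [hp]⟩)
        · intro h; exact h.1
    rw [hhead]
    cases hps : pvSep (p, a) with
    | true => rfl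
    | false => simp only [Bool.false_eq_true, ite_false]; rw [ih a]

-- find.go on a single-character needle is first-index search
theorem pv_findgo_char (c : Char) : ∀ (l : List Char) (k : Nat),
    PySem.Chars.find.go [c] l k
      = (match List.findIdx? (fun x => x == c) l with
         | some j => ((k + j : Nat) : Int)
         | none => -1) := by
  intro l
  induction l with
  | nil => intro k; simp [PySem.Chars.find.go]
  | cons a t ih =>
    intro k
    rw [PySem.Chars.find.go]
    by_cases hac : a = c
    · subst hac
      rw [if_pos (by simp [List.isPrefixOf])]
      simp [List.findIdx?_cons]
    · rw [if_neg (by simp [List.isPrefixOf]; exact fun h => hac h.symm)]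
      rw [ih (k + 1)]
      simp only [List.findIdx?_cons, beq_eq_false_iff_ne.mpr hac]
      cases List.findIdx? (fun x => x == c) t with
      | none => rfl
      | some j => simp only [Option.map_some]; push_cast; ring

theorem pv_find_char (c : Char) (l : List Char) :
    PySem.Chars.find l [c]
      = (match List.findIdx? (fun x => x == c) l with
         | some j => ((j : Nat) : Int)
         | none => -1) := by
  rw [PySem.Chars.find, pv_findgo_char]
  cases List.findIdx? (fun x => x == c) l with
  | none => rfl
  | some j => simp

-- first index of (p ∨ q) is the min of the first indices
theorem pv_findIdx_or (p q : Char → Bool) : ∀ (l : List Char),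
    List.findIdx? (fun x => p x || q x) l
      = (match List.findIdx? p l, List.findIdx? q l with
         | none, b => b
         | a, none => a
         | some i, some j => some (min i j)) := by
  intro l
  induction l with
  | nil => simp
  | cons a t ih =>
    by_cases hp : p a <;> by_cases hq : q a
    · simp [List.findIdx?_cons, hp, hq]
    · rcases hQ : List.findIdx? q t with _ | j <;>
        simp [List.findIdx?_cons, hp, hq, hQ]
    · rcases hP : List.findIdx? p t with _ | i <;>
        simp [List.findIdx?_cons, hp, hq, hP]
    · rcases hP : List.findIdx? p t with _ | i <;> rcases hQ : List.findIdx? q t with _ | j <;>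
        simp [List.findIdx?_cons, hp, hq, hP, hQ, ih]

-- B on a nonempty masked list c0 :: r: the find/min combine is the shifted first sign of r
theorem pv_combine (c0 : Char) (r : List Char) :
    (if PySem.Chars.findFrom (c0 :: r) ['+'] 1 none < 0 then
        PySem.Chars.findFrom (c0 :: r) ['-'] 1 none
      else if PySem.Chars.findFrom (c0 :: r) ['-'] 1 none < 0 then
        PySem.Chars.findFrom (c0 :: r) ['+'] 1 none
      else
        min (PySem.Chars.findFrom (c0 :: r) ['+'] 1 none)
          (PySem.Chars.findFrom (c0 :: r) ['-'] 1 none))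
      = (match List.findIdx? (fun x => x == '+' || x == '-') r with
         | some k => ((1 + k : Nat) : Int)
         | none => -1) := by
  have hfrom : ∀ c : Char, PySem.Chars.findFrom (c0 :: r) [c] 1 none
      = (match List.findIdx? (fun x => x == c) r with
         | some j => ((1 + j : Nat) : Int)
         | none => -1) := by
    intro c
    have hone : (1 : Int) = ((1 : Nat) : Int) := by norm_num
    rw [hone, PySem.Chars.findFrom_natCast (c0 :: r) [c] 1 (by simp)]
    simp only [List.drop_succ_cons, List.drop_zero]
    rw [pv_find_char]
    cases List.findIdx? (fun x => x == c) r with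
    | none => simp
    | some j =>
      dsimp only
      have hne : ((j : Nat) : Int) ≠ -1 := by omega
      rw [if_neg hne]
      push_cast
      ring
  simp only [hfrom, pv_findIdx_or (fun x => x == '+') (fun x => x == '-') r]
  cases hP : List.findIdx? (fun x => x == '+') r with
  | none =>
    cases hM : List.findIdx? (fun x => x == '-') r with
    | none => simp
    | some j => simp
  | some i =>
    cases hM : List.findIdx? (fun x => x == '-') r with
    | none =>
      dsimp only
      have h1 : ¬ (((1 + i : Nat) : Int) < 0) := by push_cast; omega
      rw [if_neg h1, if_pos (by norm_num : (-1 : Int) < 0)]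
    | some j =>
      dsimp only
      have h1 : ¬ (((1 + i : Nat) : Int) < 0) := by push_cast; omega
      have h2 : ¬ (((1 + j : Nat) : Int) < 0) := by push_cast; omega
      rw [if_neg h1, if_neg h2]
      rcases Nat.le_total i j with h | h
      · have hle : ((1 + i : Nat) : Int) ≤ ((1 + j : Nat) : Int) := by push_cast; omega
        rw [Nat.min_eq_left h, min_eq_left hle]
      · have hle : ((1 + j : Nat) : Int) ≤ ((1 + i : Nat) : Int) := by push_cast; omega
        rw [Nat.min_eq_right h, min_eq_right hle]

-- B's whole computation, on the list side, as the pairwise first-match search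
theorem pv_alt_eq_findIdx (token : String) :
    find_complex_separator_py_alt token
      = (match List.findIdx? pvSep (token.toList.zip (token.toList.drop 1)) with
         | some k => ((k + 1 : Nat) : Int)
         | none => -1) := by
  unfold find_complex_separator_py_alt
  have hrep : (PySem.Str.replace (PySem.Str.replace (PySem.Str.replace
      (PySem.Str.replace token "e+" "e#") "e-" "e#") "E+" "E#") "E-" "E#").toList
      = pvMask2 'E' '-' '#' (pvMask2 'E' '+' '#' (pvMask2 'e' '-' '#'
          (pvMask2 'e' '+' '#' token.toList))) := by
    simp only [PySem.Str.toList_replace]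
    rw [show ("e+").toList = ['e', '+'] from rfl, show ("e#").toList = ['e', '#'] from rfl,
        show ("e-").toList = ['e', '-'] from rfl,
        show ("E+").toList = ['E', '+'] from rfl, show ("E#").toList = ['E', '#'] from rfl,
        show ("E-").toList = ['E', '-'] from rfl]
    rw [pv_replace_eq_mask2 'e' '+' (by decide) (by decide),
        pv_replace_eq_mask2 'e' '-' (by decide) (by decide),
        pv_replace_eq_mask2 'E' '+' (by decide) (by decide),
        pv_replace_eq_mask2 'E' '-' (by decide) (by decide)]
  have hmask : pvMask2 'E' '-' '#' (pvMask2 'E' '+' '#' (pvMask2 'e' '-' '#'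
      (pvMask2 'e' '+' '#' token.toList))) = pvMaskAll '#' token.toList :=
    pv_mask_comp token.toList '#' '#' '#' '#' '#' (by simp) (by simp) (by simp) (by simp)
  simp only [PySem.Str.findFrom_eq, hrep, hmask]
  cases hcs : token.toList with
  | nil => simp [pvMaskAll, PySem.Chars.findFrom]
  | cons c0 t =>
    have hhd : pvMaskAll '#' (c0 :: t) = c0 :: pvMaskAll c0 t := by
      simp [pvMaskAll]
    rw [hhd]
    rw [show ("+").toList = ['+'] from rfl, show ("-").toList = ['-'] from rfl]
    rw [pv_combine c0 (pvMaskAll c0 t), pv_findIdx_maskAll t c0]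
    simp only [List.drop_succ_cons, List.drop_zero]
    cases List.findIdx? pvSep ((c0 :: t).zip t) with
    | none => rfl
    | some k => simp only []; push_cast; ring_nf

-- ===== VERDICT (by name: the statement is the Claim_ definition above) =====
theorem pv_loop_eq_alt (token : String) :
    pvLoopA token.toList 1 = find_complex_separator_py_alt token := by
  have h := pvLoopA_eq_findIdx token.toList 0
  simp only [List.drop_zero, Nat.zero_add] at h
  rw [h, pv_alt_eq_findIdx]
  cases List.findIdx? pvSep (token.toList.zip (token.toList.drop 1)) with
  | none => rfl
  | some k => dsimp only; push_cast; ring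

theorem find_complex_separator_py_spec : Claim_equal_find_complex_separator_py := by
  intro token _
  unfold Spec_find_complex_separator_py find_complex_separator_py
  split_ifs with hc
  · exact pv_loop_eq_alt token
  · rw [pvLoopA_zero_eq_one]; exact pv_loop_eq_alt token
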